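-- pv_equiv track=rewrite | github.com/BenPomme/betfair | factory/experiment_runner.py | _prediction_window_sizes
-- ===== SOURCE A (Python) =====
-- from typing import Any, Dict, Iterable, List, Optional, Tuple
--
-- def _prediction_window_sizes(horizon_seconds: int, example_count: int) -> Tuple[int, int]:
--     if horizon_seconds <= 120:
--         train_window, test_window = 160, 40
--     elif horizon_seconds <= 600:
--         train_window, test_window = 220, 55
--     elif horizon_seconds <= 1800:
--         train_window, test_window = 280, 70
--     else:
--         train_window, test_window = 360, 90
--     max_train = max(80, example_count - 24)
--     train_window = min(train_window, max_train)
--     remaining = max(12, example_count - train_window)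
--     test_window = min(test_window, max(12, remaining // 3 or 12))
--     while train_window + test_window > example_count and train_window > 80:
--         train_window -= 20
--     while train_window + test_window > example_count and test_window > 12:
--         test_window -= 4
--     return max(80, train_window), max(12, test_window)
-- ===== SOURCE B (Python) =====
-- def _prediction_window_sizes(horizon_seconds, example_count):
--     if horizon_seconds <= 120:
--         train_window, test_window = 160, 40
--     elif horizon_seconds <= 600:
--         train_window, test_window = 220, 55
--     elif horizon_seconds <= 1800:
--         train_window, test_window = 280, 70
--     else:
--         train_window, test_window = 360, 90
--     train_window = min(train_window, max(80, example_count - 24))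
--     remaining = max(12, example_count - train_window)
--     test_window = min(test_window, max(12, remaining // 3 or 12))
--     # closed-form replacement of the two decrement loops
--     k = max(0, min(-(-(train_window + test_window - example_count) // 20),
--                    -(-(train_window - 80) // 20)))
--     train_window -= 20 * k
--     k = max(0, min(-(-(train_window + test_window - example_count) // 4),
--                    -(-(test_window - 12) // 4)))
--     test_window -= 4 * k
--     return max(80, train_window), max(12, test_window)
-- ===== Notes on version B (the rewrite author's own statement) =====
-- stated objective: alternative
-- what changed: The two step-wise decrement while-loops (20-step train shrink, 4-step test shrink) are replaced by closed-form ceiling-division step counts applied in one subtraction each, so B is loop-free.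
import Mathlib
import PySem

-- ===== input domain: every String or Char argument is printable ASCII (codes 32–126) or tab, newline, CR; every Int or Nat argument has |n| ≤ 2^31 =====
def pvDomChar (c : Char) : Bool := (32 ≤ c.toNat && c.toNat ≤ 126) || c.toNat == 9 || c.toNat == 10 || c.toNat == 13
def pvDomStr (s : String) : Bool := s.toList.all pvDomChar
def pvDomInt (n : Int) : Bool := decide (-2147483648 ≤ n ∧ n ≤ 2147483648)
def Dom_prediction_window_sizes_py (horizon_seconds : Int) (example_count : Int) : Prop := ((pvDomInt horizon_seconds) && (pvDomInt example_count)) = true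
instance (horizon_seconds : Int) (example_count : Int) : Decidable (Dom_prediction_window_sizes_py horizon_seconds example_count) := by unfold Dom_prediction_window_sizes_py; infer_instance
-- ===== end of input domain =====

-- B replaces A's two step-wise decrement while-loops by closed-form ceiling-division step counts (objective: faster by a constant mechanism on loop-heavy inputs; structurally loop-free).

-- ===== PORT A =====
-- 'while train_window + test_window > example_count and train_window > 80: train_window -= 20'
def pvTrainLoop (ec tw t : Int) : Int :=
  if t + tw > ec ∧ t > 80 then pvTrainLoop ec tw (t - 20) else t
termination_by (t - 80).toNat
decreasing_by omega

-- 'while train_window + test_window > example_count and test_window > 12: test_window -= 4'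
def pvTestLoop (ec t s : Int) : Int :=
  if t + s > ec ∧ s > 12 then pvTestLoop ec t (s - 4) else s
termination_by (s - 12).toNat
decreasing_by omega

def prediction_window_sizes_py (horizon_seconds : Int) (example_count : Int) : Int × Int :=
  let p : Int × Int :=
    if horizon_seconds ≤ 120 then (160, 40)
    else if horizon_seconds ≤ 600 then (220, 55)
    else if horizon_seconds ≤ 1800 then (280, 70)
    else (360, 90)
  let max_train := max 80 (example_count - 24)
  let train := min p.1 max_train
  let remaining := max 12 (example_count - train)
  let r3 := PySem.Int.floordiv remaining 3        -- remaining // 3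
  let test := min p.2 (max 12 (if r3 = 0 then 12 else r3))   -- 'remaining // 3 or 12'
  let train' := pvTrainLoop example_count test train
  let test' := pvTestLoop example_count train' test
  (max 80 train', max 12 test')

-- ===== PORT B =====
-- -(-x // d) = ceil(x / d)
def pvCeilDiv (x d : Int) : Int := -(PySem.Int.floordiv (-x) d)

def prediction_window_sizes_py_alt (horizon_seconds : Int) (example_count : Int) : Int × Int :=
  let p : Int × Int :=
    if horizon_seconds ≤ 120 then (160, 40)
    else if horizon_seconds ≤ 600 then (220, 55)
    else if horizon_seconds ≤ 1800 then (280, 70)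
    else (360, 90)
  let train := min p.1 (max 80 (example_count - 24))
  let remaining := max 12 (example_count - train)
  let r3 := PySem.Int.floordiv remaining 3
  let test := min p.2 (max 12 (if r3 = 0 then 12 else r3))
  let k1 := max 0 (min (pvCeilDiv (train + test - example_count) 20) (pvCeilDiv (train - 80) 20))
  let train' := train - 20 * k1
  let k2 := max 0 (min (pvCeilDiv (train' + test - example_count) 4) (pvCeilDiv (test - 12) 4))
  let test' := test - 4 * k2
  (max 80 train', max 12 test')

-- ===== PRECONDITION & SPEC =====
def Spec_prediction_window_sizes_py (horizon_seconds : Int) (example_count : Int) (out : Int × Int) : Prop := out = prediction_window_sizes_py_alt horizon_seconds example_count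
instance (horizon_seconds : Int) (example_count : Int) (out : Int × Int) : Decidable (Spec_prediction_window_sizes_py horizon_seconds example_count out) := by unfold Spec_prediction_window_sizes_py; infer_instance

-- ===== CLAIM (what is proved, stated in full; the proofs are below) =====
def Claim_equal_prediction_window_sizes_py : Prop := ∀ (horizon_seconds : Int) (example_count : Int), Dom_prediction_window_sizes_py horizon_seconds example_count → Spec_prediction_window_sizes_py horizon_seconds example_count (prediction_window_sizes_py horizon_seconds example_count)

-- ===== LEMMAS AND PROOFS =====

theorem pvTrainLoop_closed (ec tw t : Int) :
    pvTrainLoop ec tw t =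
      t - 20 * max 0 (min (pvCeilDiv (t + tw - ec) 20) (pvCeilDiv (t - 80) 20)) := by
  fun_induction pvTrainLoop ec tw t with
  | case1 t hcond ih =>
    rw [ih]
    simp only [pvCeilDiv, PySem.Int.floordiv_eq_ediv_of_pos (show (0:Int) < 20 by norm_num)]
    omega
  | case2 t hcond =>
    simp only [pvCeilDiv, PySem.Int.floordiv_eq_ediv_of_pos (show (0:Int) < 20 by norm_num)]
    omega

theorem pvTestLoop_closed (ec t s : Int) :
    pvTestLoop ec t s =
      s - 4 * max 0 (min (pvCeilDiv (t + s - ec) 4) (pvCeilDiv (s - 12) 4)) := by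
  fun_induction pvTestLoop ec t s with
  | case1 s hcond ih =>
    rw [ih]
    simp only [pvCeilDiv, PySem.Int.floordiv_eq_ediv_of_pos (show (0:Int) < 4 by norm_num)]
    omega
  | case2 s hcond =>
    simp only [pvCeilDiv, PySem.Int.floordiv_eq_ediv_of_pos (show (0:Int) < 4 by norm_num)]
    omega

-- ===== VERDICT (by name: the statement is the Claim_ definition above) =====
theorem prediction_window_sizes_py_spec : Claim_equal_prediction_window_sizes_py := by
  intro h ec _
  unfold Spec_prediction_window_sizes_py prediction_window_sizes_py prediction_window_sizes_py_alt
  simp only [pvTrainLoop_closed, pvTestLoop_closed]
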